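-- pv_equiv track=rewrite | github.com/Pancio-code/Fondamenti-informatica-I | esami/esame2/ProvaAlCalcolatore/Compito_B/Eserc2/B_Ex2_Sol.py | B_Ex2
-- ===== SOURCE A (Python) =====
-- def B_Ex2(m):
--     righe = len(m)
--     colonne = len(m[0])
--     sumRighe = []
--     sumCol = [0]*colonne
--     for i in range(righe):
--         sumRighe.append(sum(m[i]))
--         for j in range(colonne):
--             sumCol[j] += m[i][j]
--     conta = 0
--     for i in range(righe):
--         for j in range(colonne):
--             if sumRighe[i] == sumCol[j]:
--                 conta += 1
--     return conta
-- ===== SOURCE B (Python) =====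
-- def B_Ex2(m):
--     freq = {}
--     for col in zip(*m):
--         s = sum(col)
--         freq[s] = freq.get(s, 0) + 1
--     return sum(freq.get(sum(r), 0) for r in m)
-- ===== Notes on version B (the rewrite author's own statement) =====
-- stated objective: simpler
-- what changed: Replaces A's nested row-by-column comparison double loop with a frequency dictionary of the column sums (columns taken via zip(*m)), looked up once per row sum.
import Mathlib
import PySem

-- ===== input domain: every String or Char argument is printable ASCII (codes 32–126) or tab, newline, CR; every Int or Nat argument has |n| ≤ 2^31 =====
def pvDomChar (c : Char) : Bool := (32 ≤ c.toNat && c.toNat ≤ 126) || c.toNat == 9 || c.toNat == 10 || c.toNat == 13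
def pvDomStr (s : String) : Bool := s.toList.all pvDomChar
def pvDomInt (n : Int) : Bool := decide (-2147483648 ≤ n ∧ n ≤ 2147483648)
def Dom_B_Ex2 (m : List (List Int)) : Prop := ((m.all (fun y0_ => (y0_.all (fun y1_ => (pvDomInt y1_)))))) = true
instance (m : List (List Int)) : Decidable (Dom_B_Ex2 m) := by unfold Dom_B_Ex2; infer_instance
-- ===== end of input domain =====

-- B replaces A's nested row×column comparison loop by a frequency dictionary of the
-- column sums (built from zip(*m)) looked up once per row sum: objective = simpler.

-- ===== PORT A =====
-- literal transliteration of A: builds sumRighe and the accumulator list sumCol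
-- in one loop over rows, then counts matching (i, j) pairs with a nested loop.
def B_Ex2 (m : List (List Int)) : Int :=
  let righe := m.length
  let colonne := (m.headD []).length
  let sumRighe := (List.range righe).map (fun i => (m.getD i []).sum)
  let sumCol := (List.range righe).foldl
    (fun sc i => (List.range colonne).foldl
      (fun sc j => sc.set j (sc.getD j 0 + (m.getD i []).getD j 0)) sc)
    (List.replicate colonne (0 : Int))
  (List.range righe).foldl
    (fun c i => (List.range colonne).foldl
      (fun c j => if sumRighe.getD i 0 = sumCol.getD j 0 then c + 1 else c) c)
    (0 : Int)

-- ===== PORT B =====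
-- zip(*m): columns of m, truncated to the shortest row (exact: zip stops at the
-- shortest iterable; each element is in range of every row, so getD never defaults).
def pyZipStar (m : List (List Int)) : List (List Int) :=
  (List.range (((m.map (fun r => r.length)).min?).getD 0)).map
    (fun j => m.map (fun r => r.getD j 0))

def B_Ex2_alt (m : List (List Int)) : Int :=
  let freq := (pyZipStar m).foldl
    (fun d col => d.insert col.sum (d.getD col.sum 0 + 1)) PySem.Dict.empty
  (m.map (fun r => freq.getD r.sum 0)).sum

-- ===== PRECONDITION & SPEC =====
-- Pre_ excludes exactly the inputs where A raises IndexError: the empty matrix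
-- (m[0]) and matrices with a row shorter than the first row (m[i][j]).
def Pre_B_Ex2 (m : List (List Int)) : Prop :=
  m ≠ [] ∧ ∀ r ∈ m, (m.headD []).length ≤ r.length
instance (m : List (List Int)) : Decidable (Pre_B_Ex2 m) := by unfold Pre_B_Ex2; infer_instance
def pvWitness_B_Ex2 : List (List Int) := [[1, 2], [3, 0]]

def Spec_B_Ex2 (m : List (List Int)) (out : Int) : Prop := out = B_Ex2_alt m
instance (m : List (List Int)) (out : Int) : Decidable (Spec_B_Ex2 m out) := by unfold Spec_B_Ex2; infer_instance

-- ===== CLAIM (what is proved, stated in full; the proofs are below) =====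
def Claim_equal_B_Ex2 : Prop := ∀ (m : List (List Int)), Dom_B_Ex2 m → Pre_B_Ex2 m → Spec_B_Ex2 m (B_Ex2 m)

-- ===== LEMMAS AND PROOFS =====

-- map over range with getD = map over the list itself
theorem map_range_getD {α β : Type} (m : List α) (d : α) (g : α → β) :
    (List.range m.length).map (fun i => g (m.getD i d)) = m.map g := by
  induction m with
  | nil => rfl
  | cons a t ih =>
    simp only [List.length_cons, List.range_succ_eq_map, List.map_cons, List.map_map]
    simpa using ih

-- the pointwise-add inner loop, characterised with an invariant on a prefix
theorem setfold_prefix (row : List Int) (sc : List Int) (n : ℕ) (hn : n ≤ sc.length) :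
    (List.range n).foldl (fun sc j => sc.set j (sc.getD j 0 + row.getD j 0)) sc
      = (List.range n).map (fun j => sc.getD j 0 + row.getD j 0) ++ sc.drop n := by
  induction n with
  | zero => simp
  | succ k ih =>
    have hk : k ≤ sc.length := Nat.le_of_succ_le hn
    have hklt : k < sc.length := hn
    rw [List.range_succ, List.foldl_append, ih hk]
    simp only [List.foldl_cons, List.foldl_nil, List.range_succ, List.map_append, List.map_cons,
      List.map_nil]
    have hlen : ((List.range k).map (fun j => sc.getD j 0 + row.getD j 0)).length = k := by simp
    have hdrop : sc.drop k = sc.getD k 0 :: sc.drop (k + 1) := by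
      rw [List.getD_eq_getElem _ _ hklt]
      exact List.drop_eq_getElem_cons hklt
    rw [hdrop]
    have hgd : ((List.range k).map (fun j => sc.getD j 0 + row.getD j 0) ++
        sc.getD k 0 :: sc.drop (k + 1)).getD k 0 = sc.getD k 0 := by
      rw [List.getD_eq_getElem?_getD, List.getElem?_append_right (le_of_eq hlen), hlen]
      simp
    rw [hgd]
    rw [List.set_append]
    simp [hlen]

theorem setfold_full (row : List Int) (sc : List Int) :
    (List.range sc.length).foldl (fun sc j => sc.set j (sc.getD j 0 + row.getD j 0)) sc
      = (List.range sc.length).map (fun j => sc.getD j 0 + row.getD j 0) := by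
  simpa using setfold_prefix row sc sc.length le_rfl

-- A's sumCol accumulator equals the list of column sums (taken entry-wise over the rows)
theorem sumCol_eq (m : List (List Int)) (colonne : ℕ) :
    (List.range m.length).foldl
      (fun sc i => (List.range colonne).foldl
        (fun sc j => sc.set j (sc.getD j 0 + (m.getD i []).getD j 0)) sc)
      (List.replicate colonne (0 : Int))
    = (List.range colonne).map (fun j => (m.map (fun r => r.getD j 0)).sum) := by
  have key : ∀ n : ℕ,
      (List.range n).foldl
        (fun sc i => (List.range colonne).foldl
          (fun sc j => sc.set j (sc.getD j 0 + (m.getD i []).getD j 0)) sc)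
        (List.replicate colonne (0 : Int))
      = (List.range colonne).map
          (fun j => ((List.range n).map (fun i => (m.getD i []).getD j 0)).sum) := by
    intro n
    induction n with
    | zero =>
      simp [List.eq_replicate_iff]
    | succ k ih =>
      rw [List.range_succ, List.foldl_append, ih]
      simp only [List.foldl_cons, List.foldl_nil]
      have hlen : ((List.range colonne).map
          (fun j => ((List.range k).map (fun i => (m.getD i []).getD j 0)).sum)).length
          = colonne := by simp
      have hfull := setfold_full (m.getD k [])
        ((List.range colonne).map
          (fun j => ((List.range k).map (fun i => (m.getD i []).getD j 0)).sum))
      rw [hlen] at hfull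
      rw [hfull]
      apply List.map_congr_left
      intro j hj
      have hjlt : j < colonne := List.mem_range.mp hj
      rw [List.getD_eq_getElem _ _ (by simpa using hjlt)]
      simp [List.range_succ, hjlt]
  calc _ = _ := key m.length
    _ = _ := by
      apply List.map_congr_left
      intro j _
      rw [map_range_getD m [] (fun r => r.getD j 0)]

theorem countP_range_count (l : List Int) (a : Int) :
    (List.range l.length).countP (fun j => l.getD j 0 == a) = l.count a := by
  conv_rhs => rw [← List.map_id' l, ← map_range_getD l 0 (fun x => x)]
  simp [List.count_eq_countP, List.countP_map, Function.comp_def]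

-- the counting inner loop is a countP
theorem foldl_count (p : ℕ → Prop) [DecidablePred p] (l : List ℕ) (c : Int) :
    l.foldl (fun c j => if p j then c + 1 else c) c = c + (l.countP (fun j => decide (p j)) : Int) := by
  induction l generalizing c with
  | nil => simp
  | cons a t ih =>
    by_cases h : p a <;> simp [List.countP_cons, h, ih] <;> ring

-- under Pre_, the zip(*m) truncation length is exactly the first row's length
theorem min_len_eq (m : List (List Int)) (h : Pre_B_Ex2 m) :
    (((m.map (fun r => r.length)).min?).getD 0) = (m.headD []).length := by
  obtain ⟨hne, hall⟩ := h
  obtain ⟨r0, t, rfl⟩ := List.exists_cons_of_ne_nil hne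
  simp only [List.headD_cons] at hall ⊢
  rw [List.map_cons, List.min?_cons']
  simp only [Option.getD_some]
  have : ∀ l : List (List Int), (∀ r ∈ l, r0.length ≤ r.length) →
      (l.map (fun r => r.length)).foldl min r0.length = r0.length := by
    intro l
    induction l with
    | nil => intro _; rfl
    | cons a s ih =>
      intro hl
      simp only [List.map_cons, List.foldl_cons]
      rw [min_eq_left (hl a (by simp))]
      exact ih (fun r hr => hl r (by simp [hr]))
  exact this t (fun r hr => hall r (by simp [hr]))

-- ===== VERDICT (by name: the statement is the Claim_ definition above) =====
set_option maxRecDepth 8000 in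
theorem B_Ex2_spec : Claim_equal_B_Ex2 := by
  intro m _ hpre
  unfold Spec_B_Ex2
  simp only [B_Ex2, B_Ex2_alt, pyZipStar]
  rw [min_len_eq m hpre]
  set colonne := (m.headD []).length with hcol
  rw [sumCol_eq m colonne]
  set colSums : List Int := (List.range colonne).map (fun j => (m.map (fun r => r.getD j 0)).sum)
    with hcolSums
  rw [show (List.foldl (fun (d : PySem.Dict Int Int) (col : List Int) => d.insert col.sum (d.getD col.sum 0 + 1)) PySem.Dict.empty ((List.range (m.headD []).length).map (fun j => m.map (fun r => r.getD j 0)))) = (List.foldl (fun (d : PySem.Dict Int Int) (s : Int) => d.insert s (d.getD s 0 + 1)) PySem.Dict.empty (((List.range (m.headD []).length).map (fun j => m.map (fun r => r.getD j 0))).map List.sum)) from by simp [List.foldl_map, List.map_map]]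
  rw [PySem.Dict.foldl_insert_getD_add_one_eq_counter]
  -- right-hand side: counts in the column-sum list
  have hR : ((List.range colonne).map (fun j => m.map (fun r => r.getD j 0))).map List.sum
      = colSums := by
    rw [hcolSums, List.map_map]; rfl
  rw [hR]
  -- inner loop of A: count of sumRighe[i] among colSums
  have hlenCS : colSums.length = colonne := by simp [hcolSums]
  have inner : ∀ (a : Int) (c : Int),
      (List.range colonne).foldl (fun c j => if a = colSums.getD j 0 then c + 1 else c) c
        = c + (colSums.count a : Int) := by
    intro a c
    rw [foldl_count (fun j => a = colSums.getD j 0)]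
    congr 1
    rw [← hlenCS, ← countP_range_count colSums a]
    congr 1
    apply List.countP_congr
    intro j _
    simp only [beq_iff_eq, decide_eq_true_eq]
    exact eq_comm
  have hfun : (fun (c : Int) (i : ℕ) =>
      (List.range colonne).foldl
        (fun c j => if ((List.range m.length).map (fun i => (m.getD i []).sum)).getD i 0
            = colSums.getD j 0 then c + 1 else c) c)
      = (fun (c : Int) (i : ℕ) =>
          c + (colSums.count (((List.range m.length).map (fun i => (m.getD i []).sum)).getD i 0) : Int)) := by
    funext c i
    exact inner _ c
  rw [hfun]
  -- outer loop: sum over rows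
  rw [PySem.List.foldl_add (l := List.range m.length)
    (g := fun i => (colSums.count
      (((List.range m.length).map (fun i => (m.getD i []).sum)).getD i 0) : Int)) (a := 0)]
  rw [zero_add]
  -- align the two sums over rows
  have hget : ∀ i ∈ List.range m.length,
      ((List.range m.length).map (fun i => (m.getD i []).sum)).getD i 0
        = (m.getD i []).sum := by
    intro i hi
    have hil : i < m.length := List.mem_range.mp hi
    rw [List.getD_eq_getElem _ _ (by simpa using hil)]
    simp
  rw [List.map_congr_left (fun i hi => by rw [hget i hi])]
  rw [map_range_getD m [] (fun r => (colSums.count r.sum : Int))]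
  apply congrArg
  apply List.map_congr_left
  intro r _
  rw [PySem.Dict.getD_counter]
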